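-- pv_equiv track=rewrite | github.com/abc123me/abcco8r2 | mcasm_compiler/mcasm/ccompiler.py | assembleLogisim
-- ===== SOURCE A (Python) =====
-- def assembleLogisim(asm, header="v2.0 raw\n", ipl=16, nl="\n"):
-- 	b = 0
-- 	out = header
-- 	for ins in asm:
-- 		w = hex(ins)[2:]
-- 		b = b + 1
-- 		if(b % ipl == 0):
-- 			w = w + nl
-- 		else:
-- 			w = w + " "
-- 		out = out + w
-- 	return out
-- ===== SOURCE B (Python) =====
-- def assembleLogisim(asm, header="v2.0 raw\n", ipl=16, nl="\n"):
-- 	words = [hex(ins)[2:] for ins in asm]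
-- 	out = header
-- 	for s in range(0, len(words), ipl):
-- 		row = words[s:s+ipl]
-- 		out += " ".join(row) + (nl if len(row) == ipl else " ")
-- 	return out
-- ===== Notes on version B (the rewrite author's own statement) =====
-- stated objective: alternative
-- what changed: Replaces A's per-element running counter b with its modulo-ipl newline test by a strided two-level pass: hex words are built once, then rows words[s:s+ipl] are emitted with ' '.join, a full row ending in nl and the final partial row in a space.
-- outside the precondition, e.g. on assembleLogisim([1, 2], 'h', -1, '\n'): A returns 'h1\n2\n', B returns 'h'
import Mathlib
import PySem

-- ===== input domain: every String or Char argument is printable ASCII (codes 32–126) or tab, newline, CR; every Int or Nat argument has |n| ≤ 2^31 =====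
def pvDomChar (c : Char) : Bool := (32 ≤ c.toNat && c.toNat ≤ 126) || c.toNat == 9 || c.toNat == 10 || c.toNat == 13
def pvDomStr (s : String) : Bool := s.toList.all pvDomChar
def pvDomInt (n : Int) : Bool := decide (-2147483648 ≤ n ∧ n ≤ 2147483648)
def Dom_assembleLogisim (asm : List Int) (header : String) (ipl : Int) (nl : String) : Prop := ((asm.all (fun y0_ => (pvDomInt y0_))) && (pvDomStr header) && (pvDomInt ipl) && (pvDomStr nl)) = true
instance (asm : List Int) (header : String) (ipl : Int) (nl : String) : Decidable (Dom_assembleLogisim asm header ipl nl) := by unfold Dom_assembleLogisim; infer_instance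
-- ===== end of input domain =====

-- B replaces A's running counter with a strided rows-of-ipl grouping pass (alternative decomposition, same cost).

-- ===== PORT A =====
-- shared helper: Python's hex(ins)[2:] (both Pythons compute exactly this)
def hexDigit (n : Nat) : Char := if n < 10 then Char.ofNat (48 + n) else Char.ofNat (87 + n)

def hexNat (n : Nat) : List Char :=
  if h : n < 16 then [hexDigit n]
  else hexNat (n / 16) ++ [hexDigit (n % 16)]
decreasing_by exact Nat.div_lt_self (by omega) (by omega)

-- hex(n): "0x…" lowercase, "-0x…" for negatives (exact CPython format)
def pyHexChars (n : Int) : List Char :=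
  if n < 0 then '-' :: '0' :: 'x' :: hexNat n.natAbs else '0' :: 'x' :: hexNat n.toNat

-- hex(ins)[2:]
def pyHexW (n : Int) : String := String.mk (PySem.List.slice (pyHexChars n) (some 2) none)

-- the body of A's for-loop: state (b, out)
def aStep (ipl : Int) (nl : String) (s : Int × String) (ins : Int) : Int × String :=
  let w := pyHexW ins
  let b := s.1 + 1
  let w2 := if PySem.Int.mod b ipl = 0 then w ++ nl else w ++ " "
  (b, s.2 ++ w2)

def assembleLogisim (asm : List Int) (header : String) (ipl : Int) (nl : String) : String :=
  (asm.foldl (aStep ipl nl) ((0 : Int), header)).2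

-- ===== PORT B =====
-- the body of B's for-loop over the row starts s = 0, ipl, 2*ipl, …
def bStep (words : List String) (ipl : Int) (nl : String) (out : String) (s : Int) : String :=
  let row := PySem.List.slice words (some s) (some (s + ipl))
  out ++ PySem.Str.join " " row ++ (if ((row.length : Int) = ipl) then nl else " ")

def assembleLogisim_alt (asm : List Int) (header : String) (ipl : Int) (nl : String) : String :=
  let words := asm.map pyHexW
  (PySem.List.pyRange 0 (words.length : Int) ipl).foldl (bStep words ipl nl) header

-- ===== PRECONDITION & SPEC =====
-- Pre_ excludes ipl ≤ 0: at ipl = 0 A raises ZeroDivisionError (and B ValueError), and a negative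
-- instructions-per-line is a nonsensical corner on which A's grouping by |ipl| is an accident of its
-- modulo test (B emits just the header there).
def Pre_assembleLogisim (asm : List Int) (header : String) (ipl : Int) (nl : String) : Prop := 0 < ipl
instance (asm : List Int) (header : String) (ipl : Int) (nl : String) : Decidable (Pre_assembleLogisim asm header ipl nl) := by unfold Pre_assembleLogisim; infer_instance

def pvWitness_assembleLogisim : List Int × String × Int × String := ([3, 255, 16], "v2.0 raw\n", 2, "\n")

def Spec_assembleLogisim (asm : List Int) (header : String) (ipl : Int) (nl : String) (out : String) : Prop := out = assembleLogisim_alt asm header ipl nl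
instance (asm : List Int) (header : String) (ipl : Int) (nl : String) (out : String) : Decidable (Spec_assembleLogisim asm header ipl nl out) := by unfold Spec_assembleLogisim; infer_instance

-- ===== CLAIM (what is proved, stated in full; the proofs are below) =====
def Claim_equal_assembleLogisim : Prop := ∀ (asm : List Int) (header : String) (ipl : Int) (nl : String), Dom_assembleLogisim asm header ipl nl → Pre_assembleLogisim asm header ipl nl → Spec_assembleLogisim asm header ipl nl (assembleLogisim asm header ipl nl)

-- ===== LEMMAS AND PROOFS =====

-- common intermediate: consume `fuel ≥ words.length` rows of `p` words each
def chunkRec (p : Nat) (nl : String) : Nat → List String → String → String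
  | 0, _, out => out
  | f + 1, words, out =>
    if words.isEmpty then out
    else chunkRec p nl f (words.drop p)
      (out ++ PySem.Str.join " " (words.take p) ++ (if (words.take p).length = p then nl else " "))

theorem chunkRec_nil (p : Nat) (nl : String) (f : Nat) (out : String) :
    chunkRec p nl f [] out = out := by
  cases f <;> simp [chunkRec]

theorem chunkRec_fuel (p : Nat) (nl : String) (hp : 0 < p) :
    ∀ (f1 f2 : Nat) (words : List String) (out : String),
      words.length ≤ f1 → words.length ≤ f2 →
      chunkRec p nl f1 words out = chunkRec p nl f2 words out := by
  intro f1
  induction f1 with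
  | zero =>
    intro f2 words out h1 _
    have : words = [] := List.length_eq_zero_iff.mp (Nat.le_zero.mp h1)
    subst this; rw [chunkRec_nil, chunkRec_nil]
  | succ f ih =>
    intro f2 words out h1 h2
    cases words with
    | nil => rw [chunkRec_nil, chunkRec_nil]
    | cons w ws =>
      cases f2 with
      | zero => simp at h2
      | succ f2' =>
        simp only [chunkRec, List.isEmpty_cons, Bool.false_eq_true, if_false]
        apply ih
        · simp only [List.length_drop, List.length_cons] at *; omega
        · simp only [List.length_drop, List.length_cons] at *; omega

theorem str_join_single (w : String) : PySem.Str.join " " [w] = w := by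
  apply String.ext
  simp [PySem.Str.toList_join, PySem.Chars.join_singleton]

theorem str_join_cons (w x : String) (r : List String) :
    PySem.Str.join " " (w :: x :: r) = w ++ " " ++ PySem.Str.join " " (x :: r) := by
  apply String.ext
  simp [PySem.Str.toList_join, String.toList_append, PySem.Chars.join_cons_cons]

theorem emod_succ (i b k : Int) (hb : b % i = k) : (b + 1) % i = (k + 1) % i := by
  have h := Int.ediv_add_emod b i
  calc (b + 1) % i = (k + 1 + i * (b / i)) % i := by rw [hb] at h; congr 1; omega
  _ = (k + 1) % i := Int.add_mul_emod_self_left (k + 1) i (b / i)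

-- A's loop over one row of the output, counter offset k into the current row
theorem aloop_chunk (ipl : Int) (nl : String) (hp : 0 < ipl) :
    ∀ (t : List Int) (k : Nat) (b : Int) (out : String), t ≠ [] →
      PySem.Int.mod b ipl = (k : Int) → (k : Int) + t.length ≤ ipl →
      t.foldl (aStep ipl nl) (b, out) =
        (b + t.length,
         out ++ PySem.Str.join " " (t.map pyHexW) ++
           (if ((k : Int) + t.length = ipl) then nl else " ")) := by
  intro t
  induction t with
  | nil => intro k b out h _ _; exact absurd rfl h
  | cons w rest ih =>
    intro k b out _ hmod hlen
    have hb : b % ipl = (k : Int) := by rw [← PySem.Int.mod_eq_emod_of_pos hp]; exact hmod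
    have hstep : (b + 1) % ipl = ((k : Int) + 1) % ipl := emod_succ ipl b (k : Int) hb
    cases rest with
    | nil =>
      simp only [List.foldl_cons, List.foldl_nil, aStep, List.map_cons, List.map_nil,
        List.length_cons, List.length_nil, str_join_single]
      have hlen' : (k : Int) + 1 ≤ ipl := by simpa using hlen
      have hcond : (PySem.Int.mod (b + 1) ipl = 0) ↔ ((k : Int) + ((1 : Nat) : Int) = ipl) := by
        rw [PySem.Int.mod_eq_emod_of_pos hp, hstep]
        constructor
        · intro h; by_contra hne
          have hlt : (k : Int) + 1 < ipl := by push_cast at hne ⊢; omega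
          rw [Int.emod_eq_of_lt (by positivity) hlt] at h; omega
        · intro h; push_cast at h; rw [h]; exact Int.emod_self
      by_cases hc : (k : Int) + ((1 : Nat) : Int) = ipl
      · rw [if_pos (hcond.mpr hc), if_pos (by exact_mod_cast hc)]
        simp [String.append_assoc]
      · rw [if_neg (fun h => hc (hcond.mp h)), if_neg (by exact_mod_cast hc)]
        simp [String.append_assoc]
    | cons x r =>
      have hlt : (k : Int) + 1 < ipl := by
        simp only [List.length_cons] at hlen; push_cast at hlen; omega
      have hmod1 : PySem.Int.mod (b + 1) ipl = ((k : Int) + 1) := by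
        rw [PySem.Int.mod_eq_emod_of_pos hp, hstep, Int.emod_eq_of_lt (by positivity) hlt]
      rw [List.foldl_cons]
      have hfirst : aStep ipl nl (b, out) w = (b + 1, out ++ (pyHexW w ++ " ")) := by
        simp only [aStep, hmod1]
        rw [if_neg (by positivity)]
      rw [hfirst, ih (k + 1) (b + 1) (out ++ (pyHexW w ++ " ")) (by simp)
        (by rw [hmod1]; push_cast; ring)
        (by simp only [List.length_cons] at hlen ⊢; push_cast at hlen ⊢; omega)]
      have hiff : (((k + 1 : Nat) : Int) + ((x :: r).length : Int) = ipl) ↔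
          ((k : Int) + (((w :: x :: r).length : Nat) : Int) = ipl) := by
        simp only [List.length_cons]; push_cast; constructor <;> intro <;> omega
      rw [if_congr hiff rfl rfl]
      simp only [List.map_cons]
      rw [str_join_cons]
      refine Prod.ext ?_ ?_
      · simp only [List.length_cons]; push_cast; ring
      · simp [String.append_assoc]

-- A's whole loop, started at a counter divisible by ipl, is the row recursion
theorem aloop_eq_chunkRec (ipl : Int) (nl : String) (hp : 0 < ipl) :
    ∀ (asm : List Int) (b : Int) (out : String),
      PySem.Int.mod b ipl = 0 →
      (asm.foldl (aStep ipl nl) (b, out)).2 =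
        chunkRec ipl.toNat nl asm.length (asm.map pyHexW) out := by
  have hp' : 0 < ipl.toNat := by omega
  have hipl : ((ipl.toNat : Nat) : Int) = ipl := Int.toNat_of_nonneg (le_of_lt hp)
  suffices H : ∀ (n : Nat) (asm : List Int), asm.length = n → ∀ (b : Int) (out : String),
      PySem.Int.mod b ipl = 0 →
      (asm.foldl (aStep ipl nl) (b, out)).2 =
        chunkRec ipl.toNat nl asm.length (asm.map pyHexW) out by
    intro asm b out h; exact H asm.length asm rfl b out h
  intro n
  induction n using Nat.strong_induction_on with
  | _ n ih =>
    intro asm hlen b out hmod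
    cases asm with
    | nil => simp [chunkRec]
    | cons a as =>
      obtain ⟨q, hq⟩ : ∃ q, ipl.toNat = q + 1 := ⟨ipl.toNat - 1, by omega⟩
      have ht_ne : (a :: as).take ipl.toNat ≠ [] := by
        rw [hq, List.take_succ_cons]; simp
      have htlen : ((a :: as).take ipl.toNat).length ≤ ipl.toNat := by
        simp [List.length_take]
      have htlen' : ((0 : Nat) : Int) + (((a :: as).take ipl.toNat).length : Int) ≤ ipl := by
        simpa [hipl] using Int.ofNat_le.mpr htlen
      conv_lhs => rw [← List.take_append_drop ipl.toNat (a :: as), List.foldl_append]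
      rw [aloop_chunk ipl nl hp _ 0 b out ht_ne (by simpa using hmod) htlen']
      have hmt : List.take ipl.toNat (pyHexW a :: List.map pyHexW as)
          = List.map pyHexW ((a :: as).take ipl.toNat) := by
        rw [← List.map_cons, ← List.map_take]
      have hmd : List.drop ipl.toNat (pyHexW a :: List.map pyHexW as)
          = List.map pyHexW ((a :: as).drop ipl.toNat) := by
        rw [← List.map_cons, ← List.map_drop]
      have hiff : (((0 : Nat) : Int) + (((a :: as).take ipl.toNat).length : Int) = ipl) ↔
          ((List.map pyHexW ((a :: as).take ipl.toNat)).length = ipl.toNat) := by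
        rw [List.length_map, ← hipl]; push_cast; omega
      by_cases hd : (a :: as).drop ipl.toNat = []
      · rw [hd, List.foldl_nil]
        subst hlen
        rw [show (a :: as).length = as.length + 1 from rfl]
        simp only [chunkRec, List.map_cons, List.isEmpty_cons, Bool.false_eq_true, if_false]
        simp only [hmt, hmd]
        rw [hd, List.map_nil, chunkRec_nil, if_congr hiff rfl rfl]
      · have hlen_gt : ipl.toNat < (a :: as).length := by
          by_contra hcon
          exact hd (List.drop_eq_nil_of_le (by omega))
        have htp : ((a :: as).take ipl.toNat).length = ipl.toNat := by
          rw [List.length_take]; omega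
        have hmod2 : PySem.Int.mod (b + (((a :: as).take ipl.toNat).length : Int)) ipl = 0 := by
          rw [htp, hipl, PySem.Int.mod_eq_emod_of_pos hp, Int.add_emod_right,
            ← PySem.Int.mod_eq_emod_of_pos hp, hmod]
        have hdlen : ((a :: as).drop ipl.toNat).length < n := by
          rw [List.length_drop]; omega
        rw [ih _ hdlen _ rfl _ _ hmod2]
        subst hlen
        rw [show (a :: as).length = as.length + 1 from rfl]
        simp only [chunkRec, List.map_cons, List.isEmpty_cons, Bool.false_eq_true, if_false]
        simp only [hmt, hmd]
        rw [if_congr hiff rfl rfl]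
        apply chunkRec_fuel _ _ hp'
        · simp
        · simp only [List.length_map, List.length_drop, List.length_cons]; omega

theorem slice_mul (words : List String) (p k : Nat) :
    PySem.List.slice words (some ((p : Int) * (k : Int))) (some ((p : Int) * (k : Int) + (p : Int)))
      = List.take p (List.drop (p * k) words) := by
  have h := PySem.List.slice_natCast_add words (p * k) p
  rw [show ((p * k : Nat) : Int) = (p : Int) * (k : Int) by push_cast; ring] at h
  exact h

theorem bStep_shift (words : List String) (p : Nat) (nl : String) (o : String) (k : Nat) :
    bStep words (p : Int) nl o ((p : Int) * ((k + 1 : Nat) : Int))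
      = bStep (words.drop p) (p : Int) nl o ((p : Int) * (k : Int)) := by
  unfold bStep
  rw [slice_mul words p (k + 1), slice_mul (words.drop p) p k, List.drop_drop,
    show p + p * k = p * (k + 1) by ring]

-- B's strided loop is the row recursion
theorem bloop_eq_chunkRec (p : Nat) (hp : 0 < p) (nl : String) :
    ∀ (words : List String) (out : String),
      (List.range ((words.length + p - 1) / p)).foldl
          (fun o (k : Nat) => bStep words (p : Int) nl o ((p : Int) * (k : Int))) out =
        chunkRec p nl words.length words out := by
  suffices H : ∀ (n : Nat) (words : List String), words.length = n → ∀ (out : String),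
      (List.range ((words.length + p - 1) / p)).foldl
          (fun o (k : Nat) => bStep words (p : Int) nl o ((p : Int) * (k : Int))) out =
        chunkRec p nl words.length words out by
    intro words out; exact H words.length words rfl out
  intro n
  induction n using Nat.strong_induction_on with
  | _ n ih =>
    intro words hlen out
    cases words with
    | nil =>
      simp only [List.length_nil, Nat.zero_add]
      rw [Nat.div_eq_of_lt (by omega)]
      simp [chunkRec]
    | cons w ws =>
      have hn : ws.length + 1 = n := by simpa using hlen
      have hm : ((w :: ws).length + p - 1) / p = ((w :: ws).length - 1) / p + 1 := by
        rw [show (w :: ws).length + p - 1 = ((w :: ws).length - 1) + p by simp only [List.length_cons]; omega,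
          Nat.add_div_right _ hp]
      rw [hm, List.range_succ_eq_map, List.foldl_cons]
      have hfirst : bStep (w :: ws) (p : Int) nl out ((p : Int) * ((0 : Nat) : Int)) =
          out ++ PySem.Str.join " " ((w :: ws).take p) ++
            (if ((((w :: ws).take p).length : Nat) : Int) = (p : Int) then nl else " ") := by
        unfold bStep
        rw [slice_mul (w :: ws) p 0]
        simp
      rw [hfirst, List.foldl_map]
      have hfun : (fun (o : String) (k : Nat) => bStep (w :: ws) (p : Int) nl o ((p : Int) * ((k.succ : Nat) : Int)))
          = fun (o : String) (k : Nat) => bStep ((w :: ws).drop p) (p : Int) nl o ((p : Int) * (k : Int)) := by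
        funext o k
        exact bStep_shift (w :: ws) p nl o k
      rw [hfun]
      have hm2 : ((w :: ws).length - 1) / p = (((w :: ws).drop p).length + p - 1) / p := by
        rw [List.length_drop]
        by_cases hle : (w :: ws).length ≤ p
        · rw [Nat.div_eq_of_lt (by simp only [List.length_cons] at hle ⊢; omega),
            Nat.div_eq_of_lt (by simp only [List.length_cons] at hle ⊢; omega)]
        · congr 1; simp only [List.length_cons] at hle ⊢; omega
      rw [hm2, ih ((w :: ws).drop p).length (by simp only [List.length_drop, List.length_cons]; omega) _ rfl]
      subst hlen
      rw [show (w :: ws).length = ws.length + 1 from rfl]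
      simp only [chunkRec, List.isEmpty_cons, Bool.false_eq_true, if_false]
      have hiff : (((((w :: ws).take p).length : Nat) : Int) = (p : Int)) ↔
          (((w :: ws).take p).length = p) := by exact_mod_cast Iff.rfl
      rw [if_congr hiff rfl rfl]
      apply chunkRec_fuel _ _ hp
      · exact le_rfl
      · simp only [List.length_drop, List.length_cons]; omega

-- ===== VERDICT (by name: the statement is the Claim_ definition above) =====
theorem assembleLogisim_spec : Claim_equal_assembleLogisim := by
  intro asm header ipl nl _ hp
  have hp0 : 0 < ipl := hp
  obtain ⟨p, rfl⟩ : ∃ p : Nat, ipl = ((p : Nat) : Int) :=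
    ⟨ipl.toNat, (Int.toNat_of_nonneg (le_of_lt hp0)).symm⟩
  have hp' : 0 < p := by exact_mod_cast hp0
  unfold Spec_assembleLogisim assembleLogisim assembleLogisim_alt
  dsimp only
  rw [aloop_eq_chunkRec ((p : Nat) : Int) nl hp0 asm 0 header
      (by rw [PySem.Int.mod_eq_emod_of_pos hp0]; exact Int.zero_emod _)]
  rw [PySem.List.pyRange_of_pos 0 (((asm.map pyHexW).length : Nat) : Int) hp0, List.foldl_map]
  have hcount : (if (0 : Int) < (((asm.map pyHexW).length : Nat) : Int) then
        (((((asm.map pyHexW).length : Nat) : Int) - 0 + ((p : Nat) : Int) - 1) / ((p : Nat) : Int)).toNat else 0)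
      = ((asm.map pyHexW).length + p - 1) / p := by
    set n := (asm.map pyHexW).length with hn
    by_cases h0 : 0 < n
    · rw [if_pos (by exact_mod_cast h0)]
      rw [show ((n : Nat) : Int) - 0 + ((p : Nat) : Int) - 1 = ((n + p - 1 : Nat) : Int) by omega]
      rw [← Int.natCast_ediv, Int.toNat_natCast]
    · rw [if_neg (by omega), Nat.div_eq_of_lt (by omega)]
  rw [hcount]
  have hfun : (fun (o : String) (k : Nat) => bStep (asm.map pyHexW) ((p : Nat) : Int) nl o (0 + ((p : Nat) : Int) * (k : Int)))
      = fun (o : String) (k : Nat) => bStep (asm.map pyHexW) ((p : Nat) : Int) nl o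
          (((p : Nat) : Int) * (k : Int)) := by
    funext o k
    rw [zero_add]
  rw [hfun, bloop_eq_chunkRec p hp' nl (asm.map pyHexW) header, List.length_map,
    Int.toNat_natCast]
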